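-- pv_equiv track=rewrite | github.com/unuing/CS61A | Discussion/Disc05/disc05.py | partition_options
-- ===== SOURCE A (Python) =====
-- def partition_options(total, biggest):
--     """
--     >>> partition_options(2, 2)
--     [[2], [1, 1]]
--     >>> partition_options(3, 3)
--     [[3], [2, 1], [1, 1, 1]]
--     >>> partition_options(4, 3)
--     [[3, 1], [2, 2], [2, 1, 1], [1, 1, 1, 1]]
--     """
--     if total == 0:
--         return [[]]
--     elif biggest == 0:
--         return []
--     else:
--         with_biggest = partition_options(total - biggest, biggest) if total >= biggest else []
--         without_biggest = partition_options(total, biggest - 1)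
--         with_biggest = [([biggest] + o) for o in with_biggest]
--         return with_biggest + without_biggest
-- ===== SOURCE B (Python) =====
-- def partition_options(total, biggest):
--     if total == 0:
--         return [[]]
--     if total < 0 or biggest <= 0:
--         return []
--     # bottom-up table with structural sharing: g[t] holds the partitions of t with
--     # parts <= biggest as linked cells (head, tail-ref), listed by first part
--     # min(t, biggest) down to 1; each row is built from earlier rows.
--     g = [[None]]
--     for t in range(1, total + 1):
--         row = []
--         for q in range(min(t, biggest), 0, -1):
--             for r in g[t - q]:
--                 if r is None or r[0] <= q:
--                     row.append((q, r))
--         g.append(row)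
--     out = []
--     for cell in g[total]:
--         xs = []
--         while cell is not None:
--             xs.append(cell[0])
--             cell = cell[1]
--         out.append(xs)
--     return out
-- ===== Notes on version B (the rewrite author's own statement) =====
-- stated objective: alternative
-- what changed: Replaced the include/exclude-biggest binary recursion by a non-recursive bottom-up dynamic program: build a table g[t] of the partitions of t with parts <= biggest (as shared linked cells), each row assembled from earlier rows by largest part descending, then expand the last row.
-- outside the precondition, e.g. on partition_options(1, -1): A raises RecursionError, B returns []
import Mathlib
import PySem

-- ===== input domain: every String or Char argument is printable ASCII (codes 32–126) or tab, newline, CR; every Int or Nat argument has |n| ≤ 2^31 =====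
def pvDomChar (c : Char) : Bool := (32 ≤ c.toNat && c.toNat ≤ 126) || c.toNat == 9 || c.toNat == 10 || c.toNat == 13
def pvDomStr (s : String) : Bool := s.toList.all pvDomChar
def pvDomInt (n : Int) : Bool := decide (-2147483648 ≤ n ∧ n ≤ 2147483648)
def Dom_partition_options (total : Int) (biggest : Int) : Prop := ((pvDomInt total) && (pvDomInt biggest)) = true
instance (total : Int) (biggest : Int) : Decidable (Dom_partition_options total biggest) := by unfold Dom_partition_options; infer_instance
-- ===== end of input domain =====

-- B replaces A's include/exclude-biggest recursion by a non-recursive bottom-up table of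
-- partition rows plus a final filter; same return value, similar cost (objective: alternative).

-- ===== PORT A =====
-- A's recursion, with fuel making it total in Lean; inside Pre_ the fuel
-- (total.toNat + biggest.toNat + 1) is never exhausted (see lemmas below).
def partition_options_fuel : Nat → Int → Int → List (List Int)
  | 0, _, _ => []
  | f+1, total, biggest =>
    if total = 0 then [[]]
    else if biggest = 0 then []
    else
      (if total ≥ biggest then
        (partition_options_fuel f (total - biggest) biggest).map (fun o => biggest :: o)
       else []) ++ partition_options_fuel f total (biggest - 1)

def partition_options (total : Int) (biggest : Int) : List (List Int) :=
  partition_options_fuel (total.toNat + biggest.toNat + 1) total biggest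

-- ===== PORT B =====
-- Source B's test 'r is None or r[0] <= q' on one table cell (cells are Lean lists: None ↦ [],
-- a cons cell (q, r) ↦ q :: r)
def poKeep (q : Int) (r : List Int) : Bool :=
  match r with
  | [] => true
  | a :: _ => decide (a ≤ q)

-- Source B's inner 'for q in range(min(t, biggest), 0, -1)' loop building row t from the
-- table g (g.getD is exact here: Source B's g[t - q] is always in range when this is called)
def poRowLoop (g : List (List (List Int))) (t : Nat) : Nat → List (List Int)
  | 0 => []
  | q+1 =>
    (((g.getD (t - (q+1)) []).filter (poKeep ((q : Int)+1))).map (fun r => ((q : Int)+1) :: r))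
      ++ poRowLoop g t q

-- Source B's outer 'for t in range(1, total + 1)' loop: the table after processing row t
def poBuild (biggest : Int) : Nat → List (List (List Int))
  | 0 => [[[]]]
  | t+1 => poBuild biggest t
      ++ [poRowLoop (poBuild biggest t) (t+1) (min ((t:Int)+1) biggest).toNat]

-- Source B's final 'while cell is not None' expansion of one linked cell into a list
def poExpand : List Int → List Int
  | [] => []
  | a :: r => a :: poExpand r

def partition_options_alt (total : Int) (biggest : Int) : List (List Int) :=
  if total = 0 then [[]]
  else if total < 0 ∨ biggest ≤ 0 then []
  else ((poBuild biggest total.toNat).getD total.toNat []).map poExpand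

-- ===== PRECONDITION & SPEC =====
-- Pre_ excludes only the inputs (total ≠ 0 with biggest < 0) on which Python A's
-- 'biggest - 1' recursion never reaches a base case and raises RecursionError.
def Pre_partition_options (total : Int) (biggest : Int) : Prop := total = 0 ∨ 0 ≤ biggest
instance (total : Int) (biggest : Int) : Decidable (Pre_partition_options total biggest) := by
  unfold Pre_partition_options; infer_instance
def pvWitness_partition_options : Int × Int := (4, 3)

def Spec_partition_options (total : Int) (biggest : Int) (out : List (List Int)) : Prop := out = partition_options_alt total biggest
instance (total : Int) (biggest : Int) (out : List (List Int)) : Decidable (Spec_partition_options total biggest out) := by unfold Spec_partition_options; infer_instance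

-- ===== CLAIM (what is proved, stated in full; the proofs are below) =====
def Claim_equal_partition_options : Prop := ∀ (total : Int) (biggest : Int), Dom_partition_options total biggest → Pre_partition_options total biggest → Spec_partition_options total biggest (partition_options total biggest)

-- ===== LEMMAS AND PROOFS =====

-- Proof-layer reference recursion (first-part decomposition): poRefGo f t b enumerates the
-- partitions of t with parts ≤ b; poRefLoop is its loop over the first part p = n, …, 1.
mutual
def poRefGo (f : Nat) (total biggest : Int) : List (List Int) :=
  match f with
  | 0 => []
  | f'+1 =>
    if total = 0 then [[]]
    else poRefLoop f' total (min total biggest).toNat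
termination_by (f, 0)

def poRefLoop (f : Nat) (total : Int) (n : Nat) : List (List Int) :=
  match n with
  | 0 => []
  | n'+1 =>
    ((poRefGo f (total - ((n' : Int)+1)) ((n' : Int)+1)).map (fun r => ((n' : Int)+1) :: r))
      ++ poRefLoop f total n'
termination_by (f, n+1)
end

-- The reference recursion does not depend on the fuel, as long as it exceeds total.toNat.
theorem poRefGo_stable : ∀ f g : Nat, ∀ total biggest : Int,
    total.toNat < f → total.toNat < g → poRefGo f total biggest = poRefGo g total biggest := by
  intro f
  induction f using Nat.strong_induction_on with
  | _ f IH =>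
    intro g total biggest hf hg
    match f, g with
    | f'+1, g'+1 =>
      simp only [poRefGo]
      by_cases ht : total = 0
      · simp [ht]
      · simp only [ht, if_false]
        have hmin : (min total biggest).toNat ≤ total.toNat := by
          have := min_le_left total biggest; omega
        have loop : ∀ n : Nat, n ≤ total.toNat →
            poRefLoop f' total n = poRefLoop g' total n := by
          intro n hn
          induction n with
          | zero => simp [poRefLoop]
          | succ n' IHn =>
            simp only [poRefLoop]
            have h1 : poRefGo f' (total - ((n' : Int)+1)) ((n' : Int)+1)
                = poRefGo g' (total - ((n' : Int)+1)) ((n' : Int)+1) :=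
              IH f' (by omega) g' _ _ (by omega) (by omega)
            rw [h1, IHn (by omega)]
        exact loop _ hmin

-- A = reference: with enough fuel and 0 ≤ biggest, A's recursion equals the reference.
theorem main_eq : ∀ f : Nat, ∀ total biggest : Int, 0 ≤ biggest →
    total.toNat + biggest.toNat < f →
    partition_options_fuel f total biggest = poRefGo (total.toNat + 1) total biggest := by
  intro f
  induction f using Nat.strong_induction_on with
  | _ f IH =>
    intro total biggest hb hf
    match f with
    | f'+1 =>
      simp only [partition_options_fuel]
      by_cases ht : total = 0
      · subst ht; simp [poRefGo]
      · simp only [ht, if_false]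
        rw [show poRefGo (total.toNat + 1) total biggest
              = poRefLoop total.toNat total (min total biggest).toNat by
            simp [poRefGo, ht]]
        by_cases hb0 : biggest = 0
        · subst hb0
          have : (min total (0:Int)).toNat = 0 := by
            by_cases h : total ≤ 0
            · rw [min_eq_left h]; omega
            · rw [min_eq_right (by omega)]; rfl
          simp [this, poRefLoop]
        · have hb1 : 1 ≤ biggest := by omega
          simp only [hb0, if_false]
          have IH2 : partition_options_fuel f' total (biggest - 1)
              = poRefGo (total.toNat + 1) total (biggest - 1) :=
            IH f' (by omega) total (biggest - 1) (by omega) (by omega)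
          have hB2 : poRefGo (total.toNat + 1) total (biggest - 1)
              = poRefLoop total.toNat total (min total (biggest - 1)).toNat := by
            simp [poRefGo, ht]
          rcases lt_trichotomy total 0 with hneg | hz | hpos
          · have : ¬ total ≥ biggest := by omega
            simp only [this, if_false, List.nil_append]
            have m1 : (min total biggest).toNat = 0 := by
              rw [min_eq_left (by omega)]; omega
            have m2 : (min total (biggest - 1)).toNat = 0 := by
              rw [min_eq_left (by omega)]; omega
            rw [IH2, hB2, m1, m2]
          · exact absurd hz ht
          · by_cases hle : biggest ≤ total
            · have m1 : (min total biggest).toNat = biggest.toNat := by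
                rw [min_eq_right hle]
              have m2 : (min total (biggest - 1)).toNat = biggest.toNat - 1 := by
                rw [min_eq_right (by omega)]; omega
              have hge : total ≥ biggest := hle
              simp only [hge, if_true]
              rw [IH2, hB2, m1, m2]
              obtain ⟨k, hk⟩ : ∃ k, biggest.toNat = k + 1 := ⟨biggest.toNat - 1, by omega⟩
              rw [hk]
              have hkcast : ((k : Int) + 1) = biggest := by omega
              simp only [poRefLoop, hkcast]
              have IH1 : partition_options_fuel f' (total - biggest) biggest
                  = poRefGo ((total - biggest).toNat + 1) (total - biggest) biggest :=
                IH f' (by omega) (total - biggest) biggest hb (by omega)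
              have hstab : poRefGo total.toNat (total - biggest) biggest
                  = poRefGo ((total - biggest).toNat + 1) (total - biggest) biggest :=
                poRefGo_stable _ _ _ _ (by omega) (by omega)
              rw [IH1, hstab, Nat.add_sub_cancel]
            · have : ¬ total ≥ biggest := by omega
              simp only [this, if_false, List.nil_append]
              have m1 : (min total biggest).toNat = total.toNat := by
                rw [min_eq_left (by omega)]
              have m2 : (min total (biggest - 1)).toNat = total.toNat := by
                rw [min_eq_left (by omega)]
              rw [IH2, hB2, m1, m2]

-- Filtering the reference loop by a head predicate truncates it at q.
theorem filt_loop (pred : List Int → Bool) (q : Nat)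
    (hpred : ∀ (p : Int), 1 ≤ p → ∀ r : List Int, pred (p :: r) = decide (p ≤ (q : Int))) :
    ∀ (fuel : Nat) (t : Int) (n : Nat),
      (poRefLoop fuel t n).filter pred = poRefLoop fuel t (min n q) := by
  intro fuel t n
  induction n with
  | zero => simp [poRefLoop]
  | succ n' IHn =>
    simp only [poRefLoop, List.filter_append]
    have hblock : ((poRefGo fuel (t - ((n' : Int)+1)) ((n' : Int)+1)).map
          (fun r => ((n' : Int)+1) :: r)).filter pred
        = if n' + 1 ≤ q then
            (poRefGo fuel (t - ((n' : Int)+1)) ((n' : Int)+1)).map (fun r => ((n' : Int)+1) :: r)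
          else [] := by
      rw [List.filter_map]
      have hcomp : (pred ∘ fun r => ((n' : Int)+1) :: r) = fun _ => decide (n' + 1 ≤ q) := by
        funext r
        simp only [Function.comp]
        rw [hpred ((n' : Int)+1) (by omega) r]
        by_cases h : n' + 1 ≤ q
        · simp [h]; omega
        · simp [h]; omega
      rw [hcomp]
      by_cases h : n' + 1 ≤ q
      · simp [h]
      · simp [h]
    rw [hblock, IHn]
    by_cases h : n' + 1 ≤ q
    · have : min (n' + 1) q = n' + 1 := by omega
      rw [this]
      have : min n' q = n' := by omega
      rw [this, if_pos h]
      simp [poRefLoop]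
    · have h1 : min (n' + 1) q = q := by omega
      have h2 : min n' q = q := by omega
      rw [h1, h2, if_neg h]
      simp

-- The table is only ever extended: earlier entries are stable.
theorem poBuild_length (b : Int) : ∀ t : Nat, (poBuild b t).length = t + 1 := by
  intro t
  induction t with
  | zero => rfl
  | succ t IH => simp [poBuild, IH]

theorem poBuild_getD_mono (b : Int) : ∀ t' t : Nat, t ≤ t' →
    (poBuild b t').getD t [] = (poBuild b t).getD t [] := by
  intro t'
  induction t' with
  | zero =>
    intro t h
    have : t = 0 := by omega
    subst this; rfl
  | succ t' IH =>
    intro t h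
    rcases Nat.lt_or_ge t (t' + 1) with hlt | hge
    · have hstep : (poBuild b (t' + 1)).getD t [] = (poBuild b t').getD t [] := by
        simp only [poBuild]
        rw [List.getD_append _ _ _ _ (by rw [poBuild_length]; omega)]
      rw [hstep, IH t (by omega)]
    · have : t = t' + 1 := by omega
      subst this; rfl

-- Row t of the capped table equals the reference enumeration of the partitions of t
-- with parts ≤ b.
theorem poBuild_row (b : Int) (hb : 1 ≤ b) : ∀ t : Nat,
    (poBuild b t).getD t [] = poRefGo (t + 1) (t : Int) b := by
  intro t
  induction t using Nat.strong_induction_on with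
  | _ t IH =>
    match t with
    | 0 => simp [poBuild, poRefGo]
    | t+1 =>
      have hlast : (poBuild b (t+1)).getD (t+1) []
          = poRowLoop (poBuild b t) (t+1) (min ((t:Int)+1) b).toNat := by
        simp only [poBuild]
        rw [List.getD_append_right _ _ _ _ (by simp [poBuild_length])]
        simp [poBuild_length]
      have hrhs : poRefGo (t + 1 + 1) ((t + 1 : Nat) : Int) b
          = poRefLoop (t + 1) ((t + 1 : Nat) : Int) (min ((t:Int)+1) b).toNat := by
        simp only [poRefGo]
        rw [if_neg (by push_cast; omega)]
        congr 2
      rw [hlast, hrhs]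
      -- the row loop agrees with the reference loop, block by block
      have loop : ∀ q : Nat, q ≤ t + 1 → (q : Int) ≤ b →
          poRowLoop (poBuild b t) (t+1) q = poRefLoop (t + 1) ((t + 1 : Nat) : Int) q := by
        intro q
        induction q with
        | zero => intro _ _; simp [poRowLoop, poRefLoop]
        | succ q' IHq =>
          intro hq hqb
          simp only [poRowLoop, poRefLoop]
          have hj : t + 1 - (q' + 1) = t - q' := by omega
          have hjc : ((t + 1 : Nat) : Int) - ((q' : Int) + 1) = ((t - q' : Nat) : Int) := by
            push_cast [Nat.cast_sub (by omega : q' ≤ t)]; ring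
          have hentry : (poBuild b t).getD (t + 1 - (q' + 1)) []
              = poRefGo (t - q' + 1) ((t - q' : Nat) : Int) b := by
            rw [hj, poBuild_getD_mono b t (t - q') (by omega)]
            exact IH (t - q') (by omega)
          have hstab : poRefGo (t + 1) ((t - q' : Nat) : Int) ((q' : Int) + 1)
              = poRefGo (t - q' + 1) ((t - q' : Nat) : Int) ((q' : Int) + 1) :=
            poRefGo_stable _ _ _ _ (by omega) (by omega)
          have hblock : ((poBuild b t).getD (t + 1 - (q' + 1)) []).filter (poKeep ((q' : Int) + 1))
              = poRefGo (t - q' + 1) ((t - q' : Nat) : Int) ((q' : Int) + 1) := by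
            rw [hentry]
            by_cases hj0 : t - q' = 0
            · rw [hj0]
              simp [poRefGo, poKeep]
            · have hjpos : 0 < t - q' := by omega
              have hL : poRefGo (t - q' + 1) ((t - q' : Nat) : Int) b
                  = poRefLoop (t - q') ((t - q' : Nat) : Int)
                      (min ((t - q' : Nat) : Int) b).toNat := by
                simp only [poRefGo]
                rw [if_neg (by omega)]
              have hR : poRefGo (t - q' + 1) ((t - q' : Nat) : Int) ((q' : Int) + 1)
                  = poRefLoop (t - q') ((t - q' : Nat) : Int)
                      (min ((t - q' : Nat) : Int) ((q' : Int) + 1)).toNat := by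
                simp only [poRefGo]
                rw [if_neg (by omega)]
              rw [hL, hR]
              have hfilt := filt_loop (poKeep ((q' : Int) + 1)) (q' + 1)
                (by intro p hp r; simp only [poKeep]; rw [decide_eq_decide]; omega)
                (t - q') ((t - q' : Nat) : Int) (min ((t - q' : Nat) : Int) b).toNat
              rw [hfilt]
              congr 1
              omega
          rw [hjc, hstab, ← hblock, hj, IHq (by omega) (by omega)]
      refine loop _ (by omega) (by omega)

-- the final expansion of a cell reproduces exactly the list it represents
theorem poExpand_id : ∀ l : List Int, poExpand l = l := by
  intro l
  induction l with
  | nil => rfl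
  | cons a r IH => simp [poExpand, IH]

theorem partition_options_spec : Claim_equal_partition_options := by
  intro total biggest _hdom hpre
  unfold Spec_partition_options partition_options partition_options_alt
  by_cases ht0 : total = 0
  · subst ht0
    simp [partition_options_fuel]
  · have hb : 0 ≤ biggest := by
      rcases hpre with h | h
      · exact absurd h ht0
      · exact h
    have hA : partition_options_fuel (total.toNat + biggest.toNat + 1) total biggest
        = poRefGo (total.toNat + 1) total biggest :=
      main_eq _ total biggest hb (by omega)
    rw [hA]
    rcases lt_trichotomy total 0 with hneg | hz | hpos
    · rw [if_neg ht0, if_pos (Or.inl hneg)]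
      have h0 : total.toNat = 0 := by omega
      rw [h0]
      simp only [poRefGo]
      rw [if_neg ht0]
      have : (min total biggest).toNat = 0 := by
        rw [min_eq_left (by omega)]; omega
      rw [this]
      simp [poRefLoop]
    · exact absurd hz ht0
    · by_cases hbz : biggest ≤ 0
      · have hbe : biggest = 0 := by omega
        subst hbe
        rw [if_neg ht0, if_pos (Or.inr le_rfl)]
        simp only [poRefGo]
        rw [if_neg ht0]
        have : (min total (0:Int)).toNat = 0 := by
          rw [min_eq_right (by omega)]; rfl
        rw [this]
        simp [poRefLoop]
      · have hb1 : 1 ≤ biggest := by omega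
        rw [if_neg ht0, if_neg (by omega)]
        have hcast : ((total.toNat : Nat) : Int) = total := by omega
        rw [poBuild_row biggest hb1 total.toNat, hcast]
        have hmap : ∀ l : List (List Int), l.map poExpand = l := by
          intro l
          induction l with
          | nil => rfl
          | cons x xs IH => simp [poExpand_id, IH]
        rw [hmap]
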